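-- pv_equiv track=rewrite | github.com/tongzanyang/- | simplecrawler/processpage.py | remove_trailing_web_addr_chars
-- ===== SOURCE A (Python) =====
-- def remove_trailing_web_addr_chars(orig_url):
--     check_chars = ['#','?']
--     for c in check_chars:
--         try:
--             indx_char = orig_url.index(c)
--             orig_url = orig_url[0:indx_char]
--         except:
--             pass
--     if len(orig_url) > 0 :
--         if orig_url[-1] == "/":
--             orig_url = orig_url[0:-1]
--     return orig_url
-- ===== SOURCE B (Python) =====
-- def remove_trailing_web_addr_chars(orig_url):
--     for i, ch in enumerate(orig_url):
--         if ch == '#' or ch == '?':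
--             orig_url = orig_url[:i]
--             break
--     if orig_url.endswith('/'):
--         orig_url = orig_url[:-1]
--     return orig_url
-- ===== Notes on version B (the rewrite author's own statement) =====
-- stated objective: simpler
-- what changed: Replaces A's two successive index()/try-except scans (one per delimiter) and slicing rounds with a single forward pass that truncates at the first '#' or '?', then strips one trailing slash via endswith.
import Mathlib
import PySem

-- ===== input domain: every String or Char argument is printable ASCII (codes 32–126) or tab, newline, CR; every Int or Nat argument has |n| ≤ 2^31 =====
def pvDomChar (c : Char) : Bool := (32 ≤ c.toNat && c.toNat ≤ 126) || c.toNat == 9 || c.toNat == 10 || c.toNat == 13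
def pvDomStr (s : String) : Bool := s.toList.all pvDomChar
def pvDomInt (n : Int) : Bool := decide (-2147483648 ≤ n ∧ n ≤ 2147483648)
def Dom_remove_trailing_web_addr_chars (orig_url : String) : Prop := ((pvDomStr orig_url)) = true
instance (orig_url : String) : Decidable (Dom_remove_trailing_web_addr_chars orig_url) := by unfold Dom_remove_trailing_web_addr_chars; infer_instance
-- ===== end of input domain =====

-- B replaces A's two index()/try-except scans with one forward pass stopping at the
-- first '#' or '?', then an endswith-based trailing-slash strip (objective: simpler).

-- ===== PORT A =====
-- orig_url.index(c) / orig_url[0:indx_char]: single-char index is the first position of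
-- that char (List.findIdx? on the char list, exact); s[0:i] with 0 ≤ i is List.take i.
def pvTruncAt (s : List Char) (c : Char) : List Char :=
  match s.findIdx? (· == c) with
  | some i => s.take i        -- orig_url = orig_url[0:indx_char]
  | none   => s               -- except: pass

def remove_trailing_web_addr_chars (orig_url : String) : String :=
  let cs := ['#', '?'].foldl pvTruncAt orig_url.toList   -- for c in check_chars: ...
  -- if len(orig_url) > 0 and orig_url[-1] == "/": orig_url = orig_url[0:-1]
  let cs := if cs.length > 0 then
              (if cs.getLast? = some '/' then cs.dropLast else cs)  -- s[-1] under len>0; s[0:-1] = dropLast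
            else cs
  String.ofList cs

-- ===== PORT B =====
-- the enumerate loop of Source B: keep characters until the first '#' or '?', then stop
def pvCut : List Char → List Char
  | [] => []
  | c :: cs => if c = '#' ∨ c = '?' then [] else c :: pvCut cs

def remove_trailing_web_addr_chars_alt (orig_url : String) : String :=
  let cs := pvCut orig_url.toList
  -- if orig_url.endswith('/'): orig_url = orig_url[:-1]
  let cs := if cs.getLast? = some '/' then cs.dropLast else cs
  String.ofList cs

-- ===== PRECONDITION & SPEC =====
def Spec_remove_trailing_web_addr_chars (orig_url : String) (out : String) : Prop := out = remove_trailing_web_addr_chars_alt orig_url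
instance (orig_url : String) (out : String) : Decidable (Spec_remove_trailing_web_addr_chars orig_url out) := by unfold Spec_remove_trailing_web_addr_chars; infer_instance

-- ===== CLAIM (what is proved, stated in full; the proofs are below) =====
def Claim_equal_remove_trailing_web_addr_chars : Prop := ∀ (orig_url : String), Dom_remove_trailing_web_addr_chars orig_url → Spec_remove_trailing_web_addr_chars orig_url (remove_trailing_web_addr_chars orig_url)

-- ===== LEMMAS AND PROOFS =====

theorem pvTruncAt_nil (c : Char) : pvTruncAt [] c = [] := rfl

theorem pvTruncAt_cons (a : Char) (s : List Char) (c : Char) :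
    pvTruncAt (a :: s) c = if a = c then [] else a :: pvTruncAt s c := by
  unfold pvTruncAt
  rw [List.findIdx?_cons]
  by_cases h : a = c
  · simp [h]
  · simp only [beq_iff_eq, h, if_false]
    cases s.findIdx? (· == c) <;> simp

theorem trunc_trunc_eq_cut (s : List Char) :
    pvTruncAt (pvTruncAt s '#') '?' = pvCut s := by
  induction s with
  | nil => rfl
  | cons a s ih =>
    rw [pvTruncAt_cons]
    by_cases h1 : a = '#'
    · simp [h1, pvCut, pvTruncAt_nil]
    · rw [if_neg h1, pvTruncAt_cons]
      by_cases h2 : a = '?'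
      · simp [h2, pvCut]
      · simp [pvCut, h1, h2, ih]

theorem remove_trailing_web_addr_chars_spec : Claim_equal_remove_trailing_web_addr_chars := by
  intro orig_url _
  show _ = _
  unfold remove_trailing_web_addr_chars remove_trailing_web_addr_chars_alt
  simp only [List.foldl, trunc_trunc_eq_cut]
  cases h : pvCut orig_url.toList with
  | nil => simp
  | cons a s => simp
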